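-- pv_equiv track=rewrite | github.com/ishika0102/learn | test code/new.py | solution
-- ===== SOURCE A (Python) =====
-- from typing import List
-- from collections import Counter
--
-- def solution(wood: List[int]) -> int:
--     if not wood:
--         return 0
--
--     # Filter elements to be within the valid range (2 to 200)
--     wood = [x for x in wood if 2 <= x <= 200]
--     if not wood:
--         return 0
--
--     # Count the occurrences of each integer
--     count = Counter(wood)
--
--     # Identify the most frequent integer
--     target, max_freq = count.most_common(1)[0]
--
--     # Initial maximum count
--     max_count = max_freq
--
--     # Try to combine pairs to form the target
--     # Create a set of numbers to avoid checking pairs more than once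
--     checked_pairs = set()
--
--     # Iterate through each unique number
--     for num in count:
--         if num == target:
--             continue
--
--         for other in count:
--             if other == num or other == target:
--                 continue
--
--             # Create a frozenset of the pair (num, other)
--             pair = frozenset({num, other})
--
--             # If the pair has been checked, skip it
--             if pair in checked_pairs:
--                 continue
--
--             # If the sum of num and other equals the target, we can combine them
--             if num + other == target:
--                 max_count += min(count[num], count[other])
--
--             # Add both possible pair representations to the checked_pairs set
--             checked_pairs.add(pair)
--
--     return max_count
-- ===== SOURCE B (Python) =====
-- from typing import List
-- from collections import Counter
--
-- def solution(wood: List[int]) -> int: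
--     if not wood:
--         return 0
--     wood = [x for x in wood if 2 <= x <= 200]
--     if not wood:
--         return 0
--     count = Counter(wood)
--     target, max_freq = count.most_common(1)[0]
--     # one linear pass with complement lookup instead of the nested pair scan
--     for num in count:
--         other = target - num
--         if num != target and other != target and num < other and other in count:
--             max_freq += min(count[num], count[other])
--     return max_freq
-- ===== Notes on version B (the rewrite author's own statement) =====
-- stated objective: simpler
-- what changed: Replaces the O(k^2) nested scan over unique values with frozenset pair deduplication by a single linear pass that looks up the complement target-num and counts each pair once via the num < other guard.
import Mathlib
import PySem

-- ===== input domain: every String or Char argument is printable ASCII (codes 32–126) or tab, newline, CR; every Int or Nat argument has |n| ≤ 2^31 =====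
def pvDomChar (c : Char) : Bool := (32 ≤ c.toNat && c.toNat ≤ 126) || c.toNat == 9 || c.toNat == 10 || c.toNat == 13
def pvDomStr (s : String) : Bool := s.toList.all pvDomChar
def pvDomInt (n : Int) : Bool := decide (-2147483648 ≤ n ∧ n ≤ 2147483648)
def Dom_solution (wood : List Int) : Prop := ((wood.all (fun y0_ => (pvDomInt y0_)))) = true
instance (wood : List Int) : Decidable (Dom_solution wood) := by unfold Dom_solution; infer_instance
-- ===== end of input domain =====

-- B replaces A's quadratic nested pair scan (with frozenset deduplication) by one linear
-- pass over the counter keys using a complement lookup; objective: simpler.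

-- ===== PORT A =====
-- frozenset {a, b} of two ints, encoded as the sorted pair
def pvPair (a b : Int) : Int × Int := if a < b then (a, b) else (b, a)

-- one step of A's inner 'for other in count' loop; state = (max_count, checked_pairs)
def pvInnerStep (count : PySem.Dict Int Int) (target num : Int)
    (st : Int × PySem.Set (Int × Int)) (other : Int) : Int × PySem.Set (Int × Int) :=
  if other = num ∨ other = target then st
  else
    let pair := pvPair num other
    if PySem.Set.contains st.2 pair then st
    else ((if num + other = target then st.1 + min (count.getD num 0) (count.getD other 0) else st.1),
          PySem.Set.add st.2 pair)

def solution (wood : List Int) : Int :=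
  if wood = [] then 0
  else
    let w := wood.filter (fun x => decide (2 ≤ x) && decide (x ≤ 200))
    if w = [] then 0
    else
      let count := PySem.Dict.counter w
      let tm := (PySem.List.max? count.items (fun p => p.2)).getD (0, 0)  -- most_common(1)[0]
      let target := tm.1
      let res := count.keys.foldl
        (fun st num => if num = target then st else count.keys.foldl (pvInnerStep count target num) st)
        (tm.2, (PySem.Set.empty : PySem.Set (Int × Int)))
      res.1

-- ===== PORT B =====
def solution_alt (wood : List Int) : Int :=
  if wood = [] then 0
  else
    let w := wood.filter (fun x => decide (2 ≤ x) && decide (x ≤ 200))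
    if w = [] then 0
    else
      let count := PySem.Dict.counter w
      let tm := (PySem.List.max? count.items (fun p => p.2)).getD (0, 0)  -- most_common(1)[0]
      let target := tm.1
      count.keys.foldl
        (fun acc num =>
          let other := target - num
          if num ≠ target ∧ other ≠ target ∧ num < other ∧ count.contains other then
            acc + min (count.getD num 0) (count.getD other 0)
          else acc)
        tm.2

-- ===== PRECONDITION & SPEC =====
def Spec_solution (wood : List Int) (out : Int) : Prop := out = solution_alt wood
instance (wood : List Int) (out : Int) : Decidable (Spec_solution wood out) := by unfold Spec_solution; infer_instance

-- ===== CLAIM (what is proved, stated in full; the proofs are below) =====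
def Claim_equal_solution : Prop := ∀ (wood : List Int), Dom_solution wood → Spec_solution wood (solution wood)

-- ===== LEMMAS AND PROOFS =====

-- the contribution A collects, read off along the suffix after each key
def pvU (c : Int → Int) (t : Int) : List Int → Int
  | [] => 0
  | x :: xs => (if x ≠ t ∧ t - x ≠ t ∧ (t - x) ∈ xs then min (c x) (c (t - x)) else 0) + pvU c t xs

-- the contribution B collects, membership taken in the full key list
def pvV (c : Int → Int) (t : Int) (full : List Int) : List Int → Int
  | [] => 0
  | x :: xs => (if x ≠ t ∧ t - x ≠ t ∧ x < t - x ∧ (t - x) ∈ full then min (c x) (c (t - x)) else 0)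
      + pvV c t full xs

theorem pvPair_comm (a b : Int) : pvPair a b = pvPair b a := by
  unfold pvPair
  rcases lt_trichotomy a b with h | h | h
  · rw [if_pos h, if_neg (by omega)]
  · subst h; simp
  · rw [if_neg (by omega), if_pos h]

theorem pvPair_eq {a b c d : Int} (h : pvPair a b = pvPair c d) :
    (a = c ∧ b = d) ∨ (a = d ∧ b = c) := by
  unfold pvPair at h; split_ifs at h <;> simp_all [Prod.ext_iff]

theorem pv_single (f : Int → Int) (p : Int → Prop) [DecidablePred p] (v : Int) :
    ∀ (l : List Int), l.Nodup →
    (l.map (fun a => if p a ∧ a = v then f a else 0)).sum = if p v ∧ v ∈ l then f v else 0 := by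
  intro l
  induction l with
  | nil => simp
  | cons a l ih =>
      intro hnd
      obtain ⟨ha, hnd'⟩ := List.nodup_cons.mp hnd
      simp only [List.map_cons, List.sum_cons, ih hnd', List.mem_cons]
      by_cases hav : a = v
      · subst hav
        by_cases hp : p a <;> simp [hp, ha]
      · simp [hav, Ne.symm hav]

theorem pv_W (f : Int → Int) (x t : Int) (pre : List Int) (l : List Int) (hnd : l.Nodup) :
    (l.map (fun y => if y ≠ x ∧ y ≠ t ∧ y ∉ pre ∧ x + y = t then f y else 0)).sum
      = if ((t - x) ≠ x ∧ (t - x) ≠ t ∧ (t - x) ∉ pre) ∧ (t - x) ∈ l then f (t - x) else 0 := by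
  rw [← pv_single f (fun y => y ≠ x ∧ y ≠ t ∧ y ∉ pre) (t - x) l hnd]
  congr 1
  apply List.map_congr_left
  intro y _
  refine if_congr ?_ rfl rfl
  constructor
  · rintro ⟨h1, h2, h3, h4⟩; exact ⟨⟨h1, h2, h3⟩, by omega⟩
  · rintro ⟨⟨h1, h2, h3⟩, h4⟩; exact ⟨h1, h2, h3, by omega⟩

theorem pv_inner (count : PySem.Dict Int Int) (t num : Int) (L : List Int) :
    ∀ (acc : Int) (S : PySem.Set (Int × Int)) (pre : List Int),
    L.Nodup →
    (∀ y ∈ L, y ≠ num → y ≠ t → (pvPair num y ∈ S ↔ y ∈ pre)) →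
    (L.foldl (pvInnerStep count t num) (acc, S)).1
        = acc + (L.map (fun y => if y ≠ num ∧ y ≠ t ∧ y ∉ pre ∧ num + y = t
            then min (count.getD num 0) (count.getD y 0) else 0)).sum
    ∧ (∀ z, z ∈ (L.foldl (pvInnerStep count t num) (acc, S)).2 ↔
          (z ∈ S ∨ ∃ y, y ∈ L ∧ y ≠ num ∧ y ≠ t ∧ z = pvPair num y)) := by
  induction L with
  | nil => intro acc S pre _ _; exact ⟨by simp, by simp⟩
  | cons y ys ih =>
      intro acc S pre hnd hmem
      obtain ⟨hy_ys, hnd'⟩ := List.nodup_cons.mp hnd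
      by_cases hy : y = num ∨ y = t
      · have hstep : pvInnerStep count t num (acc, S) y = (acc, S) := by
          simp [pvInnerStep, hy]
        rw [List.foldl_cons, hstep]
        obtain ⟨h1, h2⟩ := ih acc S pre hnd' (fun y' hy' => hmem y' (List.mem_cons_of_mem _ hy'))
        refine ⟨?_, ?_⟩
        · rw [h1]; simp only [List.map_cons, List.sum_cons]
          rw [if_neg (by tauto), zero_add]
        · intro z; rw [h2 z]; simp only [List.mem_cons]
          constructor
          · rintro (hz | ⟨y', hy', hn, ht, rfl⟩)
            · exact Or.inl hz
            · exact Or.inr ⟨y', Or.inr hy', hn, ht, rfl⟩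
          · rintro (hz | ⟨y', (rfl | hy'), hn, ht, rfl⟩)
            · exact Or.inl hz
            · tauto
            · exact Or.inr ⟨y', hy', hn, ht, rfl⟩
      · rw [not_or] at hy
        by_cases hpre : y ∈ pre
        · have hin : pvPair num y ∈ S := (hmem y (List.mem_cons_self) hy.1 hy.2).mpr hpre
          have hstep : pvInnerStep count t num (acc, S) y = (acc, S) := by
            simp [pvInnerStep, hy.1, hy.2, hin]
          rw [List.foldl_cons, hstep]
          obtain ⟨h1, h2⟩ := ih acc S pre hnd' (fun y' hy' => hmem y' (List.mem_cons_of_mem _ hy'))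
          refine ⟨?_, ?_⟩
          · rw [h1]; simp only [List.map_cons, List.sum_cons]
            rw [if_neg (by tauto), zero_add]
          · intro z; rw [h2 z]; simp only [List.mem_cons]
            constructor
            · rintro (hz | ⟨y', hy', hn, ht, rfl⟩)
              · exact Or.inl hz
              · exact Or.inr ⟨y', Or.inr hy', hn, ht, rfl⟩
            · rintro (hz | ⟨y', (rfl | hy'), hn, ht, rfl⟩)
              · exact Or.inl hz
              · exact Or.inl hin
              · exact Or.inr ⟨y', hy', hn, ht, rfl⟩
        · have hnotin : pvPair num y ∉ S :=
            fun h => hpre ((hmem y (List.mem_cons_self) hy.1 hy.2).mp h)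
          have hstep : pvInnerStep count t num (acc, S) y =
              ((if num + y = t then acc + min (count.getD num 0) (count.getD y 0) else acc),
                PySem.Set.add S (pvPair num y)) := by
            simp [pvInnerStep, hy.1, hy.2, hnotin]
          rw [List.foldl_cons, hstep]
          have hmem' : ∀ y' ∈ ys, y' ≠ num → y' ≠ t →
              (pvPair num y' ∈ PySem.Set.add S (pvPair num y) ↔ y' ∈ pre) := by
            intro y' h' hn ht
            rw [PySem.Set.mem_add]
            constructor
            · rintro (h | h)
              · exact (hmem y' (List.mem_cons_of_mem _ h') hn ht).mp h
              · rcases pvPair_eq h with ⟨-, rfl⟩ | ⟨h1, -⟩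
                · exact absurd h' hy_ys
                · exact absurd h1.symm hy.1
            · intro h; exact Or.inl ((hmem y' (List.mem_cons_of_mem _ h') hn ht).mpr h)
          obtain ⟨h1, h2⟩ := ih _ _ pre hnd' hmem'
          refine ⟨?_, ?_⟩
          · rw [h1]; simp only [List.map_cons, List.sum_cons]
            by_cases hs : num + y = t
            · rw [if_pos hs, if_pos ⟨hy.1, hy.2, hpre, hs⟩]; ring
            · rw [if_neg hs, if_neg (by tauto), zero_add]
          · intro z; rw [h2 z, PySem.Set.mem_add]; simp only [List.mem_cons]
            constructor
            · rintro ((hz | rfl) | ⟨y', h', hn, ht, rfl⟩)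
              · exact Or.inl hz
              · exact Or.inr ⟨y, Or.inl rfl, hy.1, hy.2, rfl⟩
              · exact Or.inr ⟨y', Or.inr h', hn, ht, rfl⟩
            · rintro (hz | ⟨y', (rfl | h'), hn, ht, rfl⟩)
              · exact Or.inl (Or.inl hz)
              · exact Or.inl (Or.inr rfl)
              · exact Or.inr ⟨y', h', hn, ht, rfl⟩

theorem pv_outer (count : PySem.Dict Int Int) (t : Int) (ks : List Int) (hnd : ks.Nodup) :
    ∀ (rest pre : List Int) (acc : Int) (S : PySem.Set (Int × Int)),
    ks = pre ++ rest →
    (∀ z, z ∈ S ↔ ∃ a, a ∈ pre ∧ a ≠ t ∧ ∃ b, b ∈ ks ∧ b ≠ a ∧ b ≠ t ∧ z = pvPair a b) →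
    (rest.foldl (fun st n => if n = t then st else ks.foldl (pvInnerStep count t n) st) (acc, S)).1
      = acc + pvU (fun a => count.getD a 0) t rest := by
  intro rest
  induction rest with
  | nil => intro pre acc S _ _; simp [pvU]
  | cons x r ih =>
      intro pre acc S hsplit hInv
      have hnd2 : (pre ++ x :: r).Nodup := hsplit ▸ hnd
      rw [List.nodup_append] at hnd2
      obtain ⟨hpre_nd, hxr_nd, hdisj⟩ := hnd2
      have hx_pre : x ∉ pre := by
        intro h
        exact hdisj x h x List.mem_cons_self rfl
      have hx_r : x ∉ r := (List.nodup_cons.mp hxr_nd).1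
      have hr_pre : ∀ y ∈ r, y ∉ pre := by
        intro y hy h
        exact hdisj y h y (List.mem_cons_of_mem _ hy) rfl
      have hx_ks : x ∈ ks := by
        rw [hsplit]; exact List.mem_append_right _ (List.mem_cons_self)
      rw [List.foldl_cons]
      by_cases hxt : x = t
      · rw [if_pos hxt]
        have hInv' : ∀ z, z ∈ S ↔ ∃ a, a ∈ pre ++ [x] ∧ a ≠ t ∧
            ∃ b, b ∈ ks ∧ b ≠ a ∧ b ≠ t ∧ z = pvPair a b := by
          intro z; rw [hInv z]
          constructor
          · rintro ⟨a, ha, h⟩; exact ⟨a, List.mem_append_left _ ha, h⟩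
          · rintro ⟨a, ha, hat, h⟩
            rcases List.mem_append.mp ha with ha | ha
            · exact ⟨a, ha, hat, h⟩
            · have : a = x := by simpa using ha
              exact absurd (this.trans hxt) hat
        rw [ih (pre ++ [x]) acc S (by rw [hsplit, List.append_assoc]; rfl) hInv']
        simp only [pvU]
        rw [if_neg (by tauto), zero_add]
      · rw [if_neg hxt]
        have hmemS : ∀ y ∈ ks, y ≠ x → y ≠ t → (pvPair x y ∈ S ↔ y ∈ pre) := by
          intro y hy hyx hyt
          rw [hInv]
          constructor
          · rintro ⟨a, ha, hat, b, hb, hba, hbt, heq⟩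
            rcases pvPair_eq heq with ⟨hxa, -⟩ | ⟨-, hya⟩
            · exact absurd (hxa ▸ ha) hx_pre
            · rw [hya]; exact ha
          · intro hy_pre
            exact ⟨y, hy_pre, hyt, x, hx_ks, fun h => hx_pre (h ▸ hy_pre), hxt, pvPair_comm x y⟩
        obtain ⟨h1, h2⟩ := pv_inner count t x ks acc S pre hnd hmemS
        set P := ks.foldl (pvInnerStep count t x) (acc, S) with hP
        have hInv' : ∀ z, z ∈ P.2 ↔ ∃ a, a ∈ pre ++ [x] ∧ a ≠ t ∧
            ∃ b, b ∈ ks ∧ b ≠ a ∧ b ≠ t ∧ z = pvPair a b := by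
          intro z; rw [h2 z]
          constructor
          · rintro (hz | ⟨y, hy, hyx, hyt, rfl⟩)
            · obtain ⟨a, ha, h⟩ := (hInv z).mp hz
              exact ⟨a, List.mem_append_left _ ha, h⟩
            · exact ⟨x, List.mem_append_right _ (List.mem_cons_self), hxt,
                y, hy, hyx, hyt, rfl⟩
          · rintro ⟨a, ha, hat, b, hb, hba, hbt, rfl⟩
            rcases List.mem_append.mp ha with ha | ha
            · exact Or.inl ((hInv _).mpr ⟨a, ha, hat, b, hb, hba, hbt, rfl⟩)
            · have : a = x := by simpa using ha
              subst this
              exact Or.inr ⟨b, hb, hba, hbt, rfl⟩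
        have hrest := ih (pre ++ [x]) P.1 P.2 (by rw [hsplit, List.append_assoc]; rfl) hInv'
        have hPe : (P.1, P.2) = P := rfl
        rw [hPe] at hrest
        rw [hrest, h1, pv_W (fun y => min (count.getD x 0) (count.getD y 0)) x t pre ks hnd]
        have hiff : (((t - x) ≠ x ∧ (t - x) ≠ t ∧ (t - x) ∉ pre) ∧ (t - x) ∈ ks)
            ↔ (x ≠ t ∧ t - x ≠ t ∧ (t - x) ∈ r) := by
          constructor
          · rintro ⟨⟨g1, g2, g3⟩, g4⟩
            refine ⟨hxt, g2, ?_⟩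
            rw [hsplit] at g4
            rcases List.mem_append.mp g4 with h | h
            · exact absurd h g3
            · rcases List.mem_cons.mp h with h | h
              · exact absurd h g1
              · exact h
          · rintro ⟨g1, g2, g3⟩
            refine ⟨⟨fun h => hx_r (h ▸ g3), g2, hr_pre _ g3⟩, ?_⟩
            rw [hsplit]
            exact List.mem_append_right _ (List.mem_cons_of_mem _ g3)
        rw [if_congr hiff rfl rfl]
        simp only [pvU]
        ring

theorem pvV_cons_full (c : Int → Int) (t x : Int) (xs : List Int) (hx : x ∉ xs) :
    ∀ (ys : List Int),
    pvV c t (x :: xs) ys = pvV c t xs ys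
      + (ys.map (fun a => if (a ≠ t ∧ t - a ≠ t ∧ a < t - a) ∧ a = t - x
          then min (c a) (c (t - a)) else 0)).sum := by
  intro ys
  induction ys with
  | nil => simp [pvV]
  | cons a ys ih =>
      simp only [pvV, List.map_cons, List.sum_cons]
      rw [ih]
      have hhead : (if a ≠ t ∧ t - a ≠ t ∧ a < t - a ∧ (t - a) ∈ x :: xs then min (c a) (c (t - a)) else 0)
          = (if a ≠ t ∧ t - a ≠ t ∧ a < t - a ∧ (t - a) ∈ xs then min (c a) (c (t - a)) else 0)
            + (if (a ≠ t ∧ t - a ≠ t ∧ a < t - a) ∧ a = t - x then min (c a) (c (t - a)) else 0) := by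
        by_cases h1 : a ≠ t ∧ t - a ≠ t ∧ a < t - a
        · by_cases h2 : a = t - x
          · have hta : t - a = x := by omega
            rw [if_pos ⟨h1.1, h1.2.1, h1.2.2, by rw [hta]; exact List.mem_cons_self⟩,
                if_neg (fun hh => hx (hta ▸ hh.2.2.2)), if_pos ⟨h1, h2⟩, zero_add]
          · have hta : t - a ≠ x := by omega
            rw [if_neg (show ¬((a ≠ t ∧ t - a ≠ t ∧ a < t - a) ∧ a = t - x) from
                  fun hh => h2 hh.2), add_zero]
            refine if_congr ?_ rfl rfl
            simp [List.mem_cons, hta]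
        · rw [if_neg (by tauto), if_neg (by tauto), if_neg (by tauto)]; ring
      rw [hhead]; ring

theorem pv_UV (c : Int → Int) (t : Int) :
    ∀ (l : List Int), l.Nodup → pvV c t l l = pvU c t l := by
  intro l
  induction l with
  | nil => intro _; rfl
  | cons x xs ih =>
      intro hnd
      obtain ⟨hx, hnd'⟩ := List.nodup_cons.mp hnd
      simp only [pvV]
      rw [pvV_cons_full c t x xs hx xs, ih hnd',
        pv_single (fun a => min (c a) (c (t - a))) (fun a => a ≠ t ∧ t - a ≠ t ∧ a < t - a)
          (t - x) xs hnd']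
      have htt : t - (t - x) = x := by ring
      rw [htt, min_comm (c (t - x)) (c x)]
      simp only [pvU]
      by_cases h1 : x = t
      · simp [h1]
      · by_cases h2 : t - x = t
        · simp [h2]
        · by_cases h3 : (t - x) ∈ xs
          · have hxtx : x ≠ t - x := fun h => hx (h ▸ h3)
            rcases lt_or_gt_of_ne hxtx with hlt | hgt
            · rw [if_pos ⟨h1, h2, hlt, List.mem_cons_of_mem _ h3⟩,
                  if_neg (fun hh => absurd hh.1.2.2 (by omega)), if_pos ⟨h1, h2, h3⟩]
              ring
            · rw [if_neg (fun hh => absurd hh.2.2.1 (by omega)),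
                  if_pos ⟨⟨h2, h1, by omega⟩, h3⟩, if_pos ⟨h1, h2, h3⟩]
              ring
          · rw [if_neg ?hV, if_neg (fun hh => h3 hh.2), if_neg (fun hh => h3 hh.2.2)]
            · ring
            case hV =>
              rintro ⟨-, -, hlt, hm⟩
              rcases List.mem_cons.mp hm with h | h
              · omega
              · exact h3 h

theorem pv_foldB (c : Int → Int) (t : Int) (full : List Int) :
    ∀ (l : List Int) (acc : Int),
    l.foldl (fun acc n => if n ≠ t ∧ t - n ≠ t ∧ n < t - n ∧ (t - n) ∈ full
        then acc + min (c n) (c (t - n)) else acc) acc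
      = acc + pvV c t full l := by
  intro l
  induction l with
  | nil => intro acc; simp [pvV]
  | cons x xs ih =>
      intro acc
      simp only [List.foldl_cons, pvV]
      rw [ih]
      split_ifs <;> ring

theorem pv_master (count : PySem.Dict Int Int) (t mf : Int) (hnd : count.keys.Nodup) :
    ((count.keys.foldl
        (fun st num => if num = t then st else count.keys.foldl (pvInnerStep count t num) st)
        (mf, (PySem.Set.empty : PySem.Set (Int × Int)))).1)
    = count.keys.foldl
        (fun acc num => if num ≠ t ∧ t - num ≠ t ∧ num < t - num ∧ count.contains (t - num) then
            acc + min (count.getD num 0) (count.getD (t - num) 0)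
          else acc) mf := by
  have hA := pv_outer count t count.keys hnd count.keys [] mf PySem.Set.empty rfl
    (by intro z; simp [PySem.Set.empty])
  rw [hA]
  have hstep : (fun (acc num : Int) =>
        if num ≠ t ∧ t - num ≠ t ∧ num < t - num ∧ count.contains (t - num) then
          acc + min (count.getD num 0) (count.getD (t - num) 0) else acc)
      = (fun (acc num : Int) =>
        if num ≠ t ∧ t - num ≠ t ∧ num < t - num ∧ (t - num) ∈ count.keys then
          acc + min (count.getD num 0) (count.getD (t - num) 0) else acc) := by
    funext acc num
    refine if_congr (and_congr_right fun _ => and_congr_right fun _ => and_congr_right fun _ => ?_)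
      rfl rfl
    rw [PySem.Dict.contains_iff_mem_keys]
  rw [hstep, pv_foldB (fun a => count.getD a 0) t count.keys count.keys mf,
    pv_UV _ _ _ hnd]

-- ===== VERDICT (by name: the statement is the Claim_ definition above) =====
theorem solution_spec : Claim_equal_solution := by
  intro wood _
  unfold Spec_solution solution solution_alt
  by_cases h1 : wood = []
  · simp [h1]
  · simp only [h1, if_false]
    by_cases h2 : wood.filter (fun x => decide (2 ≤ x) && decide (x ≤ 200)) = []
    · simp [h2]
    · simp only [h2, if_false]
      exact pv_master _ _ _ (PySem.Dict.nodup_keys_counter _)
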